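-- pv_equiv track=rewrite | github.com/NeuralNetworkVerification/Marabou | src/maraboupy/examples/test_evaluation_methods.py | variableRanges
-- ===== SOURCE A (Python) =====
-- def variableRanges(layerSizes):
--     input_variables = []
--     b_variables = []
--     f_variables = []
--     aux_variables = []
--     output_variables = []
--
--     input_variables = [i for i in range(layerSizes[0])]
--
--     hidden_layers = layerSizes[1:-1]
--
--     for layer, hidden_layer_length in enumerate(hidden_layers):
--         for i in range(hidden_layer_length):
--             offset = sum([x*3 for x in hidden_layers[:layer]])
--
--             b_variables.append(layerSizes[0] + offset + i)
--             aux_variables.append(layerSizes[0] + offset + i+hidden_layer_length)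
--             f_variables.append(layerSizes[0] + offset + i+2*hidden_layer_length)
--
--     #final layer
--     for i in range(layerSizes[-1]):
--         offset = sum([x*3 for x in hidden_layers[:len(hidden_layers) - 1]])
--         output_variables.append(layerSizes[0] + offset + i + 3*hidden_layers[-1])
--         aux_variables.append(layerSizes[0] + offset + i + 3*hidden_layers[-1] + layerSizes[-1])
--     return input_variables, b_variables, f_variables, aux_variables, output_variables
-- ===== SOURCE B (Python) =====
-- def variableRanges(layerSizes):
--     # single pass with a running offset instead of re-summing prefixes per element
--     first = layerSizes[0]
--     hidden = layerSizes[1:-1]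
--     input_variables = list(range(first))
--     b_variables = []
--     f_variables = []
--     aux_variables = []
--     offset = first
--     for h in hidden:
--         b_variables.extend(range(offset, offset + h))
--         aux_variables.extend(range(offset + h, offset + 2 * h))
--         f_variables.extend(range(offset + 2 * h, offset + 3 * h))
--         offset += 3 * h
--     last = layerSizes[-1]
--     output_variables = list(range(offset, offset + last))
--     aux_variables.extend(range(offset + last, offset + 2 * last))
--     return input_variables, b_variables, f_variables, aux_variables, output_variables
-- ===== Notes on version B (the rewrite author's own statement) =====
-- stated objective: faster
-- what changed: B makes a single pass with a running offset (extending whole ranges per layer) instead of A recomputing the 3x prefix sum of all earlier hidden layers inside the inner loop for every variable.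
import Mathlib
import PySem

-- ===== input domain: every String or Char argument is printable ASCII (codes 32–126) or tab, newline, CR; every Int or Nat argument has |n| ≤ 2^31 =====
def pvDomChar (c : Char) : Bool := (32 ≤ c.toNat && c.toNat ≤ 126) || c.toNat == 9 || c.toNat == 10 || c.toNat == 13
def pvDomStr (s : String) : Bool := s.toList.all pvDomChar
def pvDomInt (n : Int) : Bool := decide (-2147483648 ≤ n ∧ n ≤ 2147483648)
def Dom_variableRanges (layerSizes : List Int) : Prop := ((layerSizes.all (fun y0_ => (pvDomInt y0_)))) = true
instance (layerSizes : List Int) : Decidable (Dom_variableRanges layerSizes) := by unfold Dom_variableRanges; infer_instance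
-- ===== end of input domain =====

-- B replaces A's per-element recomputation of the prefix sum by a single pass with a running offset (asymptotically faster; return value only, no mutation observable).

-- ===== PORT A =====
-- outer-loop body of A: for each (layer, hidden_layer_length), the inner `for i in range(...)`
-- recomputes offset = sum([x*3 for x in hidden_layers[:layer]]) and appends to (b, f, aux)
def aOuter (first : Int) (hidden : List Int) (st : List Int × List Int × List Int)
    (p : Int × Int) : List Int × List Int × List Int :=
  (PySem.List.pyRange 0 p.2 1).foldl
    (fun st2 i =>
      let offset := ((PySem.List.slice hidden none (some p.1)).map (fun x => x * 3)).sum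
      (st2.1 ++ [first + offset + i],
       st2.2.1 ++ [first + offset + (i + 2 * p.2)],
       st2.2.2 ++ [first + offset + (i + p.2)])) st

def variableRanges (layerSizes : List Int) : List Int × List Int × List Int × List Int × List Int :=
  let first := (PySem.List.pyGet? layerSizes 0).getD 0          -- layerSizes[0]; in range on Pre_
  let input_variables := PySem.List.pyRange 0 first 1
  let hidden := PySem.List.slice layerSizes (some 1) (some (-1)) -- layerSizes[1:-1]
  let mid := (PySem.List.enumerate hidden 0).foldl (aOuter first hidden) ([], [], [])  -- (b, f, aux)
  let last := (PySem.List.pyGet? layerSizes (-1)).getD 0        -- layerSizes[-1]; in range on Pre_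
  let fin := (PySem.List.pyRange 0 last 1).foldl
    (fun st i =>
      let offset := ((PySem.List.slice hidden none (some ((hidden.length : Int) - 1))).map (fun x => x * 3)).sum
      let hlast := (PySem.List.pyGet? hidden (-1)).getD 0       -- hidden_layers[-1]; in range whenever this loop runs, on Pre_
      (st.1 ++ [first + offset + i + 3 * hlast],
       st.2 ++ [first + offset + i + 3 * hlast + last])) ([], mid.2.2)   -- (output, aux)
  (input_variables, mid.1, mid.2.1, fin.2, fin.1)

-- ===== PORT B =====
-- B's loop body: extend the three lists with whole ranges and advance the running offset
def bStep (st : List Int × List Int × List Int × Int) (h : Int) :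
    List Int × List Int × List Int × Int :=
  let offset := st.2.2.2
  (st.1 ++ PySem.List.pyRange offset (offset + h) 1,
   st.2.1 ++ PySem.List.pyRange (offset + 2 * h) (offset + 3 * h) 1,
   st.2.2.1 ++ PySem.List.pyRange (offset + h) (offset + 2 * h) 1,
   offset + 3 * h)

def variableRanges_alt (layerSizes : List Int) : List Int × List Int × List Int × List Int × List Int :=
  let first := (PySem.List.pyGet? layerSizes 0).getD 0
  let hidden := PySem.List.slice layerSizes (some 1) (some (-1))
  let input_variables := PySem.List.pyRange 0 first 1
  let st := hidden.foldl bStep ([], [], [], first)               -- (b, f, aux, offset)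
  let last := (PySem.List.pyGet? layerSizes (-1)).getD 0
  (input_variables, st.1, st.2.1,
   st.2.2.1 ++ PySem.List.pyRange (st.2.2.2 + last) (st.2.2.2 + 2 * last) 1,
   PySem.List.pyRange st.2.2.2 (st.2.2.2 + last) 1)

-- ===== PRECONDITION & SPEC =====
-- Pre_ excludes exactly the inputs where A raises IndexError: the empty list (layerSizes[0]),
-- and lists with fewer than 3 entries whose last entry is positive (hidden_layers[-1] on an empty slice).
def Pre_variableRanges (layerSizes : List Int) : Prop :=
  layerSizes ≠ [] ∧ (3 ≤ layerSizes.length ∨ layerSizes.getLastD 0 ≤ 0)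
instance (layerSizes : List Int) : Decidable (Pre_variableRanges layerSizes) := by
  unfold Pre_variableRanges; infer_instance

def pvWitness_variableRanges : List Int := [2, 3, 1]

def Spec_variableRanges (layerSizes : List Int) (out : List Int × List Int × List Int × List Int × List Int) : Prop := out = variableRanges_alt layerSizes
instance (layerSizes : List Int) (out : List Int × List Int × List Int × List Int × List Int) : Decidable (Spec_variableRanges layerSizes out) := by unfold Spec_variableRanges; infer_instance

-- ===== CLAIM (what is proved, stated in full; the proofs are below) =====
def Claim_equal_variableRanges : Prop := ∀ (layerSizes : List Int), Dom_variableRanges layerSizes → Pre_variableRanges layerSizes → Spec_variableRanges layerSizes (variableRanges layerSizes)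

-- ===== LEMMAS AND PROOFS =====

lemma inner3 (u v w : Int) : ∀ (n : Nat) (b f a : List Int),
    (List.range n).foldl
      (fun st2 (k : Nat) => (st2.1 ++ [u + (k : Int)], st2.2.1 ++ [v + (k : Int)], st2.2.2 ++ [w + (k : Int)]))
      (b, f, a)
    = (b ++ PySem.List.pyRange u (u + n) 1,
       f ++ PySem.List.pyRange v (v + n) 1,
       a ++ PySem.List.pyRange w (w + n) 1) := by
  intro n
  induction n with
  | zero => intro b f a; simp [PySem.List.pyRange_one_eq_nil]
  | succ n ih =>
    intro b f a
    rw [List.range_succ, List.foldl_append, ih]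
    simp only [List.foldl_cons, List.foldl_nil]
    rw [show (u + (↑(n+1):Int)) = (u + n) + 1 by push_cast; ring,
        show (v + (↑(n+1):Int)) = (v + n) + 1 by push_cast; ring,
        show (w + (↑(n+1):Int)) = (w + n) + 1 by push_cast; ring,
        PySem.List.pyRange_one_succ_right (by omega),
        PySem.List.pyRange_one_succ_right (by omega),
        PySem.List.pyRange_one_succ_right (by omega)]
    simp [List.append_assoc]

lemma aInnerFold (c hl h : Int) (b f a : List Int) :
    (PySem.List.pyRange 0 h 1).foldl
      (fun st2 i => (st2.1 ++ [c + i], st2.2.1 ++ [c + (i + 2 * hl)], st2.2.2 ++ [c + (i + hl)]))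
      (b, f, a)
    = (b ++ PySem.List.pyRange c (c + h) 1,
       f ++ PySem.List.pyRange (c + 2 * hl) (c + 2 * hl + h) 1,
       a ++ PySem.List.pyRange (c + hl) (c + hl + h) 1) := by
  by_cases hh : h ≤ 0
  · rw [PySem.List.pyRange_one_eq_nil (by omega), PySem.List.pyRange_one_eq_nil (by omega),
        PySem.List.pyRange_one_eq_nil (by omega), PySem.List.pyRange_one_eq_nil (by omega)]
    simp
  · rw [PySem.List.pyRange_one, List.foldl_map]
    have hfun : (fun (st2 : List Int × List Int × List Int) (k : Nat) =>
        (st2.1 ++ [c + ((0:Int) + ↑k)], st2.2.1 ++ [c + (((0:Int) + ↑k) + 2 * hl)], st2.2.2 ++ [c + (((0:Int) + ↑k) + hl)]))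
        = (fun st2 (k : Nat) => (st2.1 ++ [c + (k : Int)], st2.2.1 ++ [(c + 2 * hl) + (k : Int)], st2.2.2 ++ [(c + hl) + (k : Int)])) := by
      funext st2 k
      simp only [Prod.mk.injEq, List.append_cancel_left_eq]
      refine ⟨?_, ?_, ?_⟩ <;> · congr 1; ring
    rw [hfun, inner3]
    rw [show c + ((h - 0).toNat : Int) = c + h by omega,
        show (c + 2*hl) + ((h - 0).toNat : Int) = c + 2*hl + h by omega,
        show (c + hl) + ((h - 0).toNat : Int) = c + hl + h by omega]

lemma inner2 (u v : Int) : ∀ (n : Nat) (o a : List Int),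
    (List.range n).foldl
      (fun st (k : Nat) => (st.1 ++ [u + (k : Int)], st.2 ++ [v + (k : Int)]))
      (o, a)
    = (o ++ PySem.List.pyRange u (u + n) 1, a ++ PySem.List.pyRange v (v + n) 1) := by
  intro n
  induction n with
  | zero => intro o a; simp [PySem.List.pyRange_one_eq_nil]
  | succ n ih =>
    intro o a
    rw [List.range_succ, List.foldl_append, ih]
    simp only [List.foldl_cons, List.foldl_nil]
    rw [show (u + (↑(n+1):Int)) = (u + n) + 1 by push_cast; ring,
        show (v + (↑(n+1):Int)) = (v + n) + 1 by push_cast; ring,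
        PySem.List.pyRange_one_succ_right (by omega),
        PySem.List.pyRange_one_succ_right (by omega)]
    simp [List.append_assoc]

lemma aFinFold (c l h : Int) (o a : List Int) :
    (PySem.List.pyRange 0 l 1).foldl
      (fun st i => (st.1 ++ [c + i + 3 * h], st.2 ++ [c + i + 3 * h + l]))
      (o, a)
    = (o ++ PySem.List.pyRange (c + 3 * h) (c + 3 * h + l) 1,
       a ++ PySem.List.pyRange (c + 3 * h + l) (c + 3 * h + l + l) 1) := by
  by_cases hh : l ≤ 0
  · rw [PySem.List.pyRange_one_eq_nil (by omega), PySem.List.pyRange_one_eq_nil (by omega),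
        PySem.List.pyRange_one_eq_nil (by omega)]
    simp
  · rw [PySem.List.pyRange_one, List.foldl_map]
    have hfun : (fun (st : List Int × List Int) (k : Nat) =>
        (st.1 ++ [c + ((0:Int) + ↑k) + 3 * h], st.2 ++ [c + ((0:Int) + ↑k) + 3 * h + l]))
        = (fun st (k : Nat) => (st.1 ++ [(c + 3 * h) + (k : Int)], st.2 ++ [(c + 3 * h + l) + (k : Int)])) := by
      funext st k
      simp only [Prod.mk.injEq, List.append_cancel_left_eq]
      refine ⟨?_, ?_⟩ <;> · congr 1; ring
    rw [hfun, inner2]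
    rw [show (c + 3*h) + ((l - 0).toNat : Int) = c + 3*h + l by omega,
        show (c + 3*h + l) + ((l - 0).toNat : Int) = c + 3*h + l + l by omega]

lemma bOffset : ∀ (tail : List Int) (b f a : List Int) (c : Int),
    (tail.foldl bStep (b, f, a, c)).2.2.2 = c + 3 * tail.sum := by
  intro tail
  induction tail with
  | nil => intro b f a c; simp
  | cons h rest ih =>
    intro b f a c
    simp only [List.foldl_cons, bStep]
    rw [ih]
    simp [List.sum_cons]; ring

lemma midFold (first : Int) (hidden : List Int) :
    ∀ (tail : List Int) (k : Nat) (b f a : List Int), hidden.drop k = tail →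
    (PySem.List.enumerate tail (k : Int)).foldl (aOuter first hidden) (b, f, a)
    = ((tail.foldl bStep (b, f, a, first + ((hidden.take k).map (fun x => x * 3)).sum)).1,
       (tail.foldl bStep (b, f, a, first + ((hidden.take k).map (fun x => x * 3)).sum)).2.1,
       (tail.foldl bStep (b, f, a, first + ((hidden.take k).map (fun x => x * 3)).sum)).2.2.1) := by
  intro tail
  induction tail with
  | nil => intro k b f a _; simp [PySem.List.enumerate_nil]
  | cons h rest ih =>
    intro k b f a hdrop
    have hget : hidden[k]? = some h := by
      have : (hidden.drop k)[0]? = hidden[k + 0]? := List.getElem?_drop ..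
      simp [hdrop] at this; simpa using this.symm
    have hdrop' : hidden.drop (k + 1) = rest := by
      have : (hidden.drop k).drop 1 = hidden.drop (k + 1) := by
        rw [List.drop_drop]
      rw [hdrop] at this
      simpa using this.symm
    have htake : hidden.take (k + 1) = hidden.take k ++ [h] := by
      rw [List.take_add_one, hget]; rfl
    rw [PySem.List.enumerate_cons, List.foldl_cons]
    have hstep : aOuter first hidden (b, f, a) ((k : Int), h)
        = (b ++ PySem.List.pyRange (first + ((hidden.take k).map (fun x => x * 3)).sum)
              (first + ((hidden.take k).map (fun x => x * 3)).sum + h) 1,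
           f ++ PySem.List.pyRange (first + ((hidden.take k).map (fun x => x * 3)).sum + 2 * h)
              (first + ((hidden.take k).map (fun x => x * 3)).sum + 2 * h + h) 1,
           a ++ PySem.List.pyRange (first + ((hidden.take k).map (fun x => x * 3)).sum + h)
              (first + ((hidden.take k).map (fun x => x * 3)).sum + h + h) 1) := by
      simp only [aOuter, PySem.List.slice_to_natCast]
      exact aInnerFold _ _ _ _ _ _
    rw [hstep]
    rw [show ((k : Int) + 1) = ((k + 1 : Nat) : Int) by push_cast; ring]
    rw [ih (k + 1) _ _ _ hdrop']
    simp only [List.foldl_cons, bStep, htake, List.map_append, List.sum_append]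
    norm_num
    refine ⟨?_, ?_, ?_⟩ <;> (congr 2; ring_nf)

lemma sum_map_three (l : List Int) : (l.map (fun x => x * 3)).sum = 3 * l.sum := by
  induction l with
  | nil => simp
  | cons x xs ih => simp [ih]; ring

lemma main : ∀ (layerSizes : List Int), Pre_variableRanges layerSizes →
    variableRanges layerSizes = variableRanges_alt layerSizes := by
  intro ls hPre
  obtain ⟨hne, hcase⟩ := hPre
  simp only [variableRanges, variableRanges_alt]
  set f0 := (PySem.List.pyGet? ls 0).getD 0 with hf0
  set hid := PySem.List.slice ls (some 1) (some (-1)) with hhid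
  set lst := (PySem.List.pyGet? ls (-1)).getD 0 with hlst
  have hmid := midFold f0 hid hid 0 [] [] [] rfl
  simp only [List.take_zero, List.map_nil, List.sum_nil, add_zero, Nat.cast_zero] at hmid
  rw [hmid, aFinFold]
  set off := (List.foldl bStep ([], [], [], f0) hid).2.2.2 with hoffdef
  set hl := (PySem.List.pyGet? hid (-1)).getD 0 with hhl
  set offp := ((PySem.List.slice hid none (some ((hid.length : Int) - 1))).map (fun x => x * 3)).sum with hoffp
  have hoff : off = f0 + 3 * hid.sum := bOffset hid [] [] [] f0
  by_cases hpos : 0 < lst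
  · -- positive final layer: Pre_ gives length ≥ 3, hidden nonempty
    have hlastv : lst = ls.getLastD 0 := by
      rw [hlst, PySem.List.pyGet?_neg_one, List.getLastD_eq_getLast?]
    have h3 : 3 ≤ ls.length := by
      rcases hcase with h | h
      · exact h
      · rw [hlastv] at hpos; omega
    have hhlen : 0 < hid.length := by
      rw [hhid, PySem.List.length_slice]
      simp
      omega
    have hhne : hid ≠ [] := by
      intro h; rw [h] at hhlen; simp at hhlen
    have hgl : hl = hid.getLast hhne := by
      rw [hhl, PySem.List.pyGet?_neg_one, List.getLast?_eq_some_getLast hhne]; rfl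
    have hov : offp = (hid.dropLast.map (fun x => x * 3)).sum := by
      rw [hoffp, show ((hid.length : Int) - 1) = ((hid.length - 1 : Nat) : Int) by omega,
          PySem.List.slice_to_natCast, ← List.dropLast_eq_take]
    have hC : f0 + offp + 3 * hl = off := by
      rw [hoff, hov, hgl, sum_map_three]
      have hsplit := List.dropLast_append_getLast hhne
      conv_rhs => rw [← hsplit]
      simp [List.sum_append]
      ring
    rw [hC, show off + lst + lst = off + 2 * lst by ring]
    simp
  · -- non-positive final layer: all four final ranges are empty
    have hle : lst ≤ 0 := by omega
    rw [PySem.List.pyRange_one_eq_nil (show f0 + offp + 3 * hl + lst ≤ f0 + offp + 3 * hl by omega),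
        PySem.List.pyRange_one_eq_nil
          (show f0 + offp + 3 * hl + lst + lst ≤ f0 + offp + 3 * hl + lst by omega),
        PySem.List.pyRange_one_eq_nil (show off + lst ≤ off by omega),
        PySem.List.pyRange_one_eq_nil (show off + 2 * lst ≤ off + lst by omega)]
    simp

-- ===== VERDICT (by name: the statement is the Claim_ definition above) =====
theorem variableRanges_spec : Claim_equal_variableRanges := by
  intro ls _ hPre
  exact main ls hPre
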